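-- pv_equiv track=rewrite | github.com/mouredev/retos-programacion-2023 | Retos/Reto #9 - HETEROGRAMA, ISOGRAMA Y PANGRAMA [Fácil]/python/fidelysla.py | heterogram
-- ===== SOURCE A (Python) =====
-- from unicodedata import normalize
--
-- def heterogram(text):
--     abc = ['A', 'B', 'C', 'D', 'E', 'F', 'G', 'H', 'I', 'J', 'K', 'L',
--            'M', 'N', 'O', 'P', 'Q', 'R', 'S', 'T', 'U', 'V', 'W', 'X', 'Y', 'Z']
--     text = list(normalize("NFD", text.upper()))
--     array = []
--     for letter in text:
--         if letter in abc:
--             array.append(letter)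
--     letters_once = []
--     condition = 0
--     for letter in array:
--         if letter in letters_once:
--             condition = 1
--         else:
--             letters_once.append(letter)
--     if condition == 1:
--         p = "no es Heterograma"
--     else:
--         p = "es un Heterograma"
--     return f"El texto {p}."
-- ===== SOURCE B (Python) =====
-- from unicodedata import normalize
--
-- def heterogram(text):
--     t = normalize("NFD", text.upper())
--     if all(t.count(c) <= 1 for c in "ABCDEFGHIJKLMNOPQRSTUVWXYZ"):
--         p = "es un Heterograma"
--     else:
--         p = "no es Heterograma"
--     return f"El texto {p}."
-- ===== Notes on version B (the rewrite author's own statement) =====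
-- stated objective: faster
-- what changed: Instead of filtering the text into a letter list and tracking duplicates with a seen-list (quadratic list membership) and a flag, B scans the 26-letter alphabet once and checks each letter occurs at most once in the normalized text (all(t.count(c) <= 1)); no filtered list and no seen collection are built.
import Mathlib
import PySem

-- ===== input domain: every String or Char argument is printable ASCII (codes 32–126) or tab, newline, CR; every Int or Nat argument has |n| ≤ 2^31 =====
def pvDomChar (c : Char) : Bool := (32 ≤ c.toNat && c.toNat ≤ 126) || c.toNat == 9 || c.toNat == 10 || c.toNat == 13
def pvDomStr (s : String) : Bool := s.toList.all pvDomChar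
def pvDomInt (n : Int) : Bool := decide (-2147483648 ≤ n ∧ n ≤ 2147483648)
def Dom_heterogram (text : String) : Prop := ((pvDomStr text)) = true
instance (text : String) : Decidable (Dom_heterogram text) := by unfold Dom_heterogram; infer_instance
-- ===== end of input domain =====

-- B replaces A's filter-then-seen-list duplicate loop by a single scan over the 26-letter
-- alphabet checking t.count(c) <= 1 for each letter (objective: faster; A's seen-list loop is quadratic).
-- NOTE: normalize("NFD", ·) is the identity on the printable-ASCII domain Dom_heterogram
-- (upper() of ASCII is ASCII, and NFD leaves ASCII unchanged), so both ports render it as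
-- the identity; this is exact on the stated domain.

-- ===== PORT A =====
def pvAbc : List Char :=
  ['A', 'B', 'C', 'D', 'E', 'F', 'G', 'H', 'I', 'J', 'K', 'L',
   'M', 'N', 'O', 'P', 'Q', 'R', 'S', 'T', 'U', 'V', 'W', 'X', 'Y', 'Z']

def heterogram (text : String) : String :=
  -- text = list(normalize("NFD", text.upper()))  (NFD = identity on Dom, see header)
  let t : List Char := PySem.Chars.upper text.toList
  -- array = []; for letter in text: if letter in abc: array.append(letter)
  let array : List Char :=
    t.foldl (fun acc letter => if pvAbc.contains letter then acc ++ [letter] else acc) []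
  -- letters_once = []; condition = 0; for letter in array: …
  let r : List Char × Int :=
    array.foldl
      (fun st letter =>
        if st.1.contains letter then (st.1, 1) else (st.1 ++ [letter], st.2))
      ([], 0)
  let p : String := if r.2 == 1 then "no es Heterograma" else "es un Heterograma"
  "El texto " ++ p ++ "."

-- ===== PORT B =====
def heterogram_alt (text : String) : String :=
  -- t = normalize("NFD", text.upper())  (NFD = identity on Dom, see header)
  let t : List Char := PySem.Chars.upper text.toList
  -- if all(t.count(c) <= 1 for c in "ABCDEFGHIJKLMNOPQRSTUVWXYZ"): …
  let p : String :=
    if ("ABCDEFGHIJKLMNOPQRSTUVWXYZ".toList).all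
        (fun c => decide (PySem.Chars.count t [c] ≤ 1)) then
      "es un Heterograma"
    else
      "no es Heterograma"
  "El texto " ++ p ++ "."

-- ===== PRECONDITION & SPEC =====
def Spec_heterogram (text : String) (out : String) : Prop := out = heterogram_alt text
instance (text : String) (out : String) : Decidable (Spec_heterogram text out) := by unfold Spec_heterogram; infer_instance

-- ===== CLAIM (what is proved, stated in full; the proofs are below) =====
def Claim_equal_heterogram : Prop := ∀ (text : String), Dom_heterogram text → Spec_heterogram text (heterogram text)

-- ===== LEMMAS AND PROOFS =====

-- A's inner loop body, named for the lemmas below.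
def pvStep (st : List Char × Int) (letter : Char) : List Char × Int :=
  if st.1.contains letter then (st.1, 1) else (st.1 ++ [letter], st.2)

lemma pvLoop_absorb (l : List Char) (s : List Char) :
    (l.foldl pvStep (s, 1)).2 = 1 := by
  induction l generalizing s with
  | nil => rfl
  | cons x l ih =>
      simp only [List.foldl_cons, pvStep]
      split <;> exact ih _

-- A's duplicate-flag loop: the flag stays 0 exactly when no element repeats or was seen.
lemma pvLoop_snd (l : List Char) (s : List Char) :
    (l.foldl pvStep (s, 0)).2 =
      if l.Nodup ∧ (∀ x ∈ l, x ∉ s) then 0 else 1 := by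
  induction l generalizing s with
  | nil => simp
  | cons x l ih =>
      simp only [List.foldl_cons]
      by_cases h : x ∈ s
      · have h1 : pvStep (s, 0) x = (s, 1) := by simp [pvStep]; exact h
        rw [h1, pvLoop_absorb]
        have : ¬ ((x :: l).Nodup ∧ ∀ y ∈ x :: l, y ∉ s) := by
          rintro ⟨-, hall⟩; exact hall x (List.mem_cons_self) h
        rw [if_neg this]
      · have h1 : pvStep (s, 0) x = (s ++ [x], 0) := by simp [pvStep]; exact h
        rw [h1, ih]
        congr 1
        simp only [eq_iff_iff, List.nodup_cons, List.mem_cons, List.mem_append, not_or]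
        constructor
        · rintro ⟨hn, hall⟩
          exact ⟨⟨fun hx => (hall x hx).2.1 rfl, hn⟩,
            fun y hy => hy.elim (fun hyx => hyx ▸ h) (fun hy' => (hall y hy').1)⟩
        · rintro ⟨⟨hxl, hn⟩, hall⟩
          exact ⟨hn, fun y hy => ⟨hall y (Or.inr hy), fun hyx => hxl (hyx ▸ hy), List.not_mem_nil⟩⟩

-- B's fuel-based count on a single-character pattern is List.count.
lemma pvCountGo (c : Char) (l : List Char) (fuel acc : Nat) (h : l.length ≤ fuel) :
    PySem.Chars.count.go [c] fuel l acc = acc + l.count c := by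
  induction l generalizing fuel acc with
  | nil => cases fuel <;> simp [PySem.Chars.count.go]
  | cons x l ih =>
      cases fuel with
      | zero => simp at h
      | succ f =>
          have hf : l.length ≤ f := by simpa using h
          by_cases hx : x = c
          · subst hx
            simp [PySem.Chars.count.go, List.isPrefixOf, ih _ _ hf]
            omega
          · have : List.isPrefixOf [c] (x :: l) = false := by
              simp [List.isPrefixOf]; exact fun hh => (hx hh.symm).elim
            simp [PySem.Chars.count.go, this, ih _ _ hf, hx]

lemma pvCount_single (c : Char) (l : List Char) :
    PySem.Chars.count l [c] = l.count c := by
  simpa using pvCountGo c l l.length 0 le_rfl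

-- A's hand-written filter loop is List.filter (via the library loop-shape lemma).
lemma pvArray_eq (t : List Char) :
    t.foldl (fun acc letter => if pvAbc.contains letter then acc ++ [letter] else acc) []
      = t.filter pvAbc.contains := by
  simpa using PySem.List.foldl_append_if pvAbc.contains id t []

-- No duplicate among the filtered letters iff every alphabet letter occurs at most once in t.
lemma pvNodup_iff (t : List Char) :
    (t.filter pvAbc.contains).Nodup ↔ ∀ c ∈ pvAbc, t.count c ≤ 1 := by
  rw [List.nodup_iff_count_le_one]
  constructor
  · intro h c hc
    have hp : pvAbc.contains c = true := by simpa using hc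
    have := h c
    rwa [List.count_filter hp] at this
  · intro h a
    by_cases hp : pvAbc.contains a = true
    · rw [List.count_filter hp]
      exact h a (by simpa using hp)
    · have : a ∉ t.filter pvAbc.contains := by
        intro hm
        exact hp (List.of_mem_filter hm)
      simp [List.count_eq_zero.mpr this]

theorem pvHeterogram_eq (text : String) : heterogram text = heterogram_alt text := by
  simp only [heterogram, heterogram_alt]
  rw [pvArray_eq]
  have hstep : (fun (st : List Char × Int) letter =>
      if st.1.contains letter then (st.1, (1 : Int)) else (st.1 ++ [letter], st.2)) = pvStep := rfl
  rw [hstep, pvLoop_snd]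
  have habc : "ABCDEFGHIJKLMNOPQRSTUVWXYZ".toList = pvAbc := by decide
  set t := PySem.Chars.upper text.toList with ht
  have hall : (("ABCDEFGHIJKLMNOPQRSTUVWXYZ".toList).all
      (fun c => decide (PySem.Chars.count t [c] ≤ 1)) = true)
      ↔ (t.filter pvAbc.contains).Nodup := by
    rw [habc, List.all_eq_true]
    simp only [decide_eq_true_eq, pvCount_single]
    exact (pvNodup_iff t).symm
  have htriv : ∀ x ∈ t.filter pvAbc.contains, x ∉ ([] : List Char) := by simp
  cases hb : ("ABCDEFGHIJKLMNOPQRSTUVWXYZ".toList).all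
      (fun c => decide (PySem.Chars.count t [c] ≤ 1)) with
  | true =>
      have h := hall.mp hb
      have hin : (if (t.filter pvAbc.contains).Nodup ∧
          ∀ x ∈ t.filter pvAbc.contains, x ∉ ([] : List Char) then (0 : Int) else 1) = 0 :=
        if_pos ⟨h, htriv⟩
      rw [hin]
      simp
  | false =>
      have h : ¬ (t.filter pvAbc.contains).Nodup := by
        intro hn
        have := (hall.mpr hn).symm.trans hb
        simp at this
      have hin : (if (t.filter pvAbc.contains).Nodup ∧
          ∀ x ∈ t.filter pvAbc.contains, x ∉ ([] : List Char) then (0 : Int) else 1) = 1 :=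
        if_neg (fun hc => h hc.1)
      rw [hin]
      simp

-- ===== VERDICT (by name: the statement is the Claim_ definition above) =====
theorem heterogram_spec : Claim_equal_heterogram := by
  intro text _
  exact pvHeterogram_eq text
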